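-- pv_equiv track=rewrite | github.com/llexieguo/ms-swift-offlineppo | merge_judge_into_msswift_jsonl.py | insert_after_key
-- ===== SOURCE A (Python) =====
-- from typing import Any
--
-- JsonDict = dict[str, Any]
--
-- def insert_after_key(record: JsonDict, after_key: str, new_items: list[tuple[str, Any]]) -> JsonDict:
--     if after_key not in record:
--         updated = dict(record)
--         for key, value in new_items:
--             updated[key] = value
--         return updated
--
--     updated: JsonDict = {}
--     inserted = False
--     for key, value in record.items():
--         updated[key] = value
--         if key == after_key:
--             for new_key, new_value in new_items:
--                 updated[new_key] = new_value
--             inserted = True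
--     if not inserted:
--         for new_key, new_value in new_items:
--             updated[new_key] = new_value
--     return updated
-- ===== SOURCE B (Python) =====
-- def insert_after_key(record, after_key, new_items):
--     items = list(record.items())
--     if after_key in record:
--         i = list(record).index(after_key)
--         spliced = items[:i + 1] + list(new_items) + items[i + 1:]
--     else:
--         spliced = items + list(new_items)
--     return dict(spliced)
-- ===== Notes on version B (the rewrite author's own statement) =====
-- stated objective: simpler
-- what changed: Replaces A's incremental rebuild loop with inserted-flag (per-key equality scan plus sequential dict assignments) by locating after_key's index once, splicing the new pairs into the items list, and building the result with a single dict() over the spliced pair list.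
import Mathlib
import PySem

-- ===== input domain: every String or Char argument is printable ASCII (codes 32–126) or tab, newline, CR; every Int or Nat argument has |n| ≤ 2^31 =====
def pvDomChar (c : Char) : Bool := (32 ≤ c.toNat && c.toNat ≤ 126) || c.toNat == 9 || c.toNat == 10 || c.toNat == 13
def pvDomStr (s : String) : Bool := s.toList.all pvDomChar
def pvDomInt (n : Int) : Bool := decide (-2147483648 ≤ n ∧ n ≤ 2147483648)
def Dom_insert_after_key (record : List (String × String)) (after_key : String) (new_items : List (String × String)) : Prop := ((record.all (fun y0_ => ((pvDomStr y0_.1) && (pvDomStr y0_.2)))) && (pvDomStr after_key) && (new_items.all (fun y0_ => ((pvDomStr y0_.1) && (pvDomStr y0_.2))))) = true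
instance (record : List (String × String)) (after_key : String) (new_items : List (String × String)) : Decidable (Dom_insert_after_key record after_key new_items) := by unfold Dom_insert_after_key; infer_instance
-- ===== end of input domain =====

-- B replaces A's incremental rebuild loop with inserted-flag by one index-find and a list splice
-- fed to a single dict construction (objective: simpler).


-- ===== PORT A =====
-- one step of A's main loop: copy the pair into `updated`, and after `after_key` splice in new_items and set the flag
def aStep (after_key : String) (new_items : List (String × String))
    (st : PySem.Dict String String × Bool) (kv : String × String) :
    PySem.Dict String String × Bool :=
  let u := st.1.insert kv.1 kv.2
  if kv.1 == after_key then (u.update new_items, true) else (u, st.2)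

def insert_after_key (record : List (String × String)) (after_key : String) (new_items : List (String × String)) : List (String × String) :=
  let d := PySem.Dict.ofList record
  if d.contains after_key = false then
    (d.update new_items).items
  else
    let st := d.items.foldl (aStep after_key new_items) (PySem.Dict.empty, false)
    (if st.2 = false then st.1.update new_items else st.1).items

-- ===== PORT B =====
def insert_after_key_alt (record : List (String × String)) (after_key : String) (new_items : List (String × String)) : List (String × String) :=
  let d := PySem.Dict.ofList record
  let items := d.items
  let spliced :=
    match PySem.List.index? d.keys after_key with
    | some i => items.take (i + 1) ++ new_items ++ items.drop (i + 1)
    | none => items ++ new_items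
  (PySem.Dict.ofList spliced).items

-- ===== PRECONDITION & SPEC =====
def Spec_insert_after_key (record : List (String × String)) (after_key : String) (new_items : List (String × String)) (out : List (String × String)) : Prop := out = insert_after_key_alt record after_key new_items
instance (record : List (String × String)) (after_key : String) (new_items : List (String × String)) (out : List (String × String)) : Decidable (Spec_insert_after_key record after_key new_items out) := by unfold Spec_insert_after_key; infer_instance

-- ===== CLAIM (what is proved, stated in full; the proofs are below) =====
def Claim_equal_insert_after_key : Prop := ∀ (record : List (String × String)) (after_key : String) (new_items : List (String × String)), Dom_insert_after_key record after_key new_items → Spec_insert_after_key record after_key new_items (insert_after_key record after_key new_items)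

-- ===== LEMMAS AND PROOFS =====

-- rebuilding a nodup-keyed dict from its own items gives it back
lemma dict_ofList_items {κ ν : Type} [BEq κ] [LawfulBEq κ] (d : PySem.Dict κ ν)
    (h : d.keys.Nodup) : PySem.Dict.ofList d.items = d := by
  apply PySem.Dict.ext
  have hfresh : ∀ p ∈ d.items, (PySem.Dict.empty : PySem.Dict κ ν).contains p.1 = false := by
    intro p _; simp [PySem.Dict.contains_empty]
  have := PySem.Dict.items_foldl_insert_fresh d.items (·.1) (·.2) PySem.Dict.empty hfresh
    (by simpa [PySem.Dict.keys] using h)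
  simpa [PySem.Dict.ofList, PySem.Dict.update] using this

-- dict update over a concatenation splits
lemma dict_update_append {κ ν : Type} [BEq κ] (d : PySem.Dict κ ν) (xs ys : List (κ × ν)) :
    d.update (xs ++ ys) = (d.update xs).update ys := by
  simp [PySem.Dict.update, List.foldl_append]

-- A's loop over pairs none of whose keys equal after_key just copies and keeps the flag
lemma loop_no_match (after_key : String) (new_items : List (String × String))
    (l : List (String × String)) (h : ∀ p ∈ l, (p.1 == after_key) = false) :
    ∀ (d : PySem.Dict String String) (b : Bool),
      l.foldl (aStep after_key new_items) (d, b) = (d.update l, b) := by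
  induction l with
  | nil => intro d b; simp [PySem.Dict.update]
  | cons p l ih =>
    intro d b
    have hp : (p.1 == after_key) = false := h p (by simp)
    have hl : ∀ q ∈ l, (q.1 == after_key) = false := fun q hq => h q (by simp [hq])
    simp only [List.foldl_cons, aStep, hp]
    rw [ih hl]
    simp [PySem.Dict.update]

theorem insert_after_key_spec_aux (record : List (String × String)) (after_key : String)
    (new_items : List (String × String)) :
    insert_after_key record after_key new_items = insert_after_key_alt record after_key new_items := by
  simp only [insert_after_key, insert_after_key_alt]
  set d := PySem.Dict.ofList record with hd
  have hnd : d.keys.Nodup := PySem.Dict.nodup_keys_ofList record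
  cases hc : d.contains after_key with
  | false =>
    -- after_key not in record: both append new_items at the end
    have hmem : after_key ∉ d.keys := by
      intro hm; rw [(PySem.Dict.contains_iff_mem_keys d after_key).mpr hm] at hc; exact Bool.true_eq_false.mp hc
    have hidx : PySem.List.index? d.keys after_key = none := by
      simp [PySem.List.index?, List.idxOf?_eq_none_iff, hmem]
    simp only [hidx, if_true]
    rw [show PySem.Dict.ofList (d.items ++ new_items) = (PySem.Dict.ofList d.items).update new_items from by
      simp [PySem.Dict.ofList, dict_update_append]]
    rw [dict_ofList_items d hnd]
  | true =>
    have hmem : after_key ∈ d.keys := (PySem.Dict.contains_iff_mem_keys d after_key).mp hc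
    obtain ⟨i, hidx⟩ : ∃ i, List.idxOf? after_key d.keys = some i := by
      cases hi : List.idxOf? after_key d.keys with
      | some i => exact ⟨i, rfl⟩
      | none => exact absurd (List.idxOf?_eq_none_iff.mp hi) (by simp [hmem])
    obtain ⟨hilt, hget, hmin⟩ := List.idxOf?_eq_some_iff.mp hidx
    have hklen : d.keys.length = d.items.length := by simp [PySem.Dict.keys]
    have hilen : i < d.items.length := hklen ▸ hilt
    have hkeyget : ∀ (j : Nat) (hj : j < d.items.length),
        d.keys[j]'(hklen ▸ hj) = (d.items[j]'hj).1 := by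
      intro j hj; simp [PySem.Dict.keys]
    have hkey : (d.items[i]'hilen).1 = after_key := by
      rw [← hkeyget i hilen]; exact hget
    -- keys strictly before index i differ from after_key
    have htake : ∀ p ∈ d.items.take i, (p.1 == after_key) = false := by
      intro p hp
      obtain ⟨j, hj, hjp⟩ := List.mem_take_iff_getElem.mp hp
      have hjlen : j < d.items.length := lt_of_lt_of_le hj (min_le_right _ _)
      have hne := hmin j (lt_of_lt_of_le hj (min_le_left _ _))
      rw [hkeyget j hjlen, hjp] at hne
      simpa using hne
    -- keys strictly after index i differ from after_key (keys are Nodup)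
    have hdrop : ∀ p ∈ d.items.drop (i + 1), (p.1 == after_key) = false := by
      intro p hp
      obtain ⟨j, hj, hjp⟩ := List.mem_drop_iff_getElem.mp hp
      have hjlen : i + 1 + j < d.items.length := by omega
      by_contra hbe
      have hpk : p.1 = after_key := by simpa using hbe
      have : d.keys[i + 1 + j]'(hklen ▸ hjlen) = d.keys[i]'hilt := by
        rw [hkeyget _ hjlen, hjp, hpk, hget]
      have := (List.Nodup.getElem_inj_iff hnd).mp this
      omega
    -- both sides compute the same spliced sequential-insertion dict
    have hidx' : PySem.List.index? d.keys after_key = some i := by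
      simp [PySem.List.index?, hidx]
    have hsplit : d.items = d.items.take i ++ (d.items[i]'hilen) :: d.items.drop (i + 1) := by
      conv_lhs => rw [← List.take_append_drop i d.items, List.drop_eq_getElem_cons hilen]
    have htk : d.items.take (i + 1) = d.items.take i ++ [d.items[i]'hilen] := by
      rw [List.take_add_one]; simp [List.getElem?_eq_getElem hilen]
    simp only [hidx']
    rw [if_neg (by simp)]
    conv_lhs => rw [hsplit]
    rw [List.foldl_append, loop_no_match after_key new_items _ htake, List.foldl_cons]
    simp only [aStep, hkey, BEq.rfl]
    rw [loop_no_match after_key new_items _ hdrop]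
    rw [htk]
    rw [show PySem.Dict.ofList ((d.items.take i ++ [d.items[i]'hilen]) ++ new_items ++ d.items.drop (i + 1))
        = ((((PySem.Dict.empty.update (d.items.take i)).update [d.items[i]'hilen]).update new_items).update (d.items.drop (i + 1))) from by
      simp only [PySem.Dict.ofList, dict_update_append]]
    simp only [PySem.Dict.update]
    simp [hkey]

-- ===== VERDICT (by name: the statement is the Claim_ definition above) =====
theorem insert_after_key_spec : Claim_equal_insert_after_key := by
  intro record after_key new_items _
  exact insert_after_key_spec_aux record after_key new_items
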